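-- pv_equiv track=rewrite | github.com/callistopan/My-leetcode-solutions | 2321-maximum-score-of-spliced-array/2321-maximum-score-of-spliced-array.py | maximumsSplicedArray
-- ===== SOURCE A (Python) =====
-- from typing import List
--
-- def maximumsSplicedArray(A: List[int], B: List[int]) -> int:
--     def kadane(A, B):
--         res = cur = 0
--         for i in range(len(A)):
--             cur = max(0, cur + A[i] - B[i])
--             res = max(res, cur)
--         return res + sum(B)
--     return max(kadane(A, B), kadane(B, A))
-- ===== SOURCE B (Python) =====
-- def maximumsSplicedArray(A, B):
--     # Divide and conquer on the difference array: each half yields a tuple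
--     # (total, best, prefix-best, suffix-best) of subarray sums (empty allowed),
--     # combined at the split point.  Answer in each direction = other sum + best.
--     def dc(d):
--         n = len(d)
--         if n == 0:
--             return (0, 0, 0, 0)
--         if n == 1:
--             x = d[0]
--             m = max(0, x)
--             return (x, m, m, m)
--         mid = n // 2
--         L = dc(d[:mid])
--         R = dc(d[mid:])
--         tot = L[0] + R[0]
--         best = max(L[1], R[1], L[3] + R[2])
--         pre = max(L[2], L[0] + R[2])
--         suf = max(R[3], L[3] + R[0])
--         return (tot, best, pre, suf)
--     d = [x - y for x, y in zip(A, B)]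
--     return max(sum(B) + dc(d)[1], sum(A) + dc([-x for x in d])[1])
-- ===== Notes on version B (the rewrite author's own statement) =====
-- stated objective: alternative
-- what changed: Replaces A's two linear Kadane DP scans by a divide-and-conquer on the difference array d=A[i]-B[i]: each half yields a (total, best, prefix-best, suffix-best) tuple combined at the split point, applied to d and to -d.
import Mathlib
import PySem

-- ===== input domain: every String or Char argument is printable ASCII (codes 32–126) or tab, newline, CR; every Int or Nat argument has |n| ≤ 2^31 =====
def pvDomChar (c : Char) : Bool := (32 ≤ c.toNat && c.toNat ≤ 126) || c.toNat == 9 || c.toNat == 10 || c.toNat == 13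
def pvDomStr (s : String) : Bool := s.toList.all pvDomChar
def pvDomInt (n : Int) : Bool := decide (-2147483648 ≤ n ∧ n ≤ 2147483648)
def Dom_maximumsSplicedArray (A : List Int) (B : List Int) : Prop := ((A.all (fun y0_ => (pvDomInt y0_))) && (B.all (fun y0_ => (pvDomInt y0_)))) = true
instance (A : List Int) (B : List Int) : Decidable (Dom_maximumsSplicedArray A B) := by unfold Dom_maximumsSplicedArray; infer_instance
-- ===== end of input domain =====

-- B replaces A's two linear Kadane scans by a divide-and-conquer over the difference
-- array, combining (total, best, prefix-best, suffix-best) tuples (alternative algorithm).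

-- ===== PORT A =====
-- helper kadane(A, B): indices run over range(len(A)); Pre_ (equal lengths) keeps
-- every pyGetD in range, so the default 0 is never read.
def pvKadane (A B : List Int) : Int :=
  (((PySem.List.pyRange 0 (A.length : Int) 1).foldl
      (fun (s : Int × Int) i =>
        let cur := max 0 (s.2 + PySem.List.pyGetD A i 0 - PySem.List.pyGetD B i 0)
        (max s.1 cur, cur)) (0, 0)).1) + B.sum

def maximumsSplicedArray (A : List Int) (B : List Int) : Int :=
  max (pvKadane A B) (pvKadane B A)

-- ===== PORT B =====
-- dc(d): Python's tuple (tot, best, pre, suf) is the nested product here.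
-- The slices d[:mid], d[mid:] with mid = n // 2 are ported as take/drop, exact
-- because 0 ≤ mid ≤ n (PySem.List.slice_natCast / slice_from_natCast).  The
-- fuel parameter (always ≥ length, consumed once per level) only makes the
-- recursion structural; with fuel ≥ length it is never exhausted.
def pvDcF : Nat → List Int → Int × Int × Int × Int
  | _, [] => (0, 0, 0, 0)
  | _, [x] => (x, max 0 x, max 0 x, max 0 x)
  | 0, _ :: _ :: _ => (0, 0, 0, 0)   -- unreachable when fuel ≥ length
  | f + 1, x :: y :: rest =>
    let d := x :: y :: rest
    let mid := d.length / 2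
    let L := pvDcF f (d.take mid)
    let R := pvDcF f (d.drop mid)
    (L.1 + R.1, max (max L.2.1 R.2.1) (L.2.2.2 + R.2.2.1),
     max L.2.2.1 (L.1 + R.2.2.1), max R.2.2.2 (L.2.2.2 + R.1))

def pvDc (d : List Int) : Int × Int × Int × Int := pvDcF d.length d

def maximumsSplicedArray_alt (A : List Int) (B : List Int) : Int :=
  let d := (A.zip B).map (fun p => p.1 - p.2)
  max (B.sum + (pvDc d).2.1) (A.sum + (pvDc (d.map (fun x => -x))).2.1)

-- ===== PRECONDITION & SPEC =====
-- Pre_ excludes lists of unequal length, on which A raises IndexError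
-- (each kadane call indexes its second argument by the first's range).
def Pre_maximumsSplicedArray (A : List Int) (B : List Int) : Prop := A.length = B.length
instance (A : List Int) (B : List Int) : Decidable (Pre_maximumsSplicedArray A B) := by
  unfold Pre_maximumsSplicedArray; infer_instance
def pvWitness_maximumsSplicedArray : List Int × List Int := ([60, 60, 60], [10, 90, 10])

def Spec_maximumsSplicedArray (A : List Int) (B : List Int) (out : Int) : Prop := out = maximumsSplicedArray_alt A B
instance (A : List Int) (B : List Int) (out : Int) : Decidable (Spec_maximumsSplicedArray A B out) := by unfold Spec_maximumsSplicedArray; infer_instance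

-- ===== CLAIM (what is proved, stated in full; the proofs are below) =====
def Claim_equal_maximumsSplicedArray : Prop := ∀ (A : List Int) (B : List Int), Dom_maximumsSplicedArray A B → Pre_maximumsSplicedArray A B → Spec_maximumsSplicedArray A B (maximumsSplicedArray A B)

-- ===== LEMMAS AND PROOFS =====

-- The linear reference: tuple fold mirroring appending one element at the right end.
def pvTStep (t : Int × Int × Int × Int) (x : Int) : Int × Int × Int × Int :=
  (t.1 + x, max t.2.1 (t.2.2.2 + x), max t.2.2.1 (t.1 + x), max 0 (t.2.2.2 + x))

def pvT (l : List Int) : Int × Int × Int × Int := l.foldl pvTStep (0, 0, 0, 0)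

-- The combine used in pvDcF, as a named function.
def pvComb (L R : Int × Int × Int × Int) : Int × Int × Int × Int :=
  (L.1 + R.1, max (max L.2.1 R.2.1) (L.2.2.2 + R.2.2.1),
   max L.2.2.1 (L.1 + R.2.2.1), max R.2.2.2 (L.2.2.2 + R.1))

def pvInv (t : Int × Int × Int × Int) : Prop :=
  0 ≤ t.2.2.2 ∧ t.2.2.2 ≤ t.2.1 ∧ t.1 ≤ t.2.2.1 ∧ 0 ≤ t.2.2.1 ∧ 0 ≤ t.2.1

theorem pvInv_step (t : Int × Int × Int × Int) (x : Int) (h : pvInv t) : pvInv (pvTStep t x) := by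
  obtain ⟨a, b, c, d⟩ := t
  simp only [pvInv, pvTStep, max_def] at *
  split_ifs <;> omega

theorem pvInv_T (l : List Int) : pvInv (pvT l) := by
  unfold pvT
  have key : ∀ (l : List Int) (t : Int × Int × Int × Int), pvInv t → pvInv (l.foldl pvTStep t) := by
    intro l
    induction l with
    | nil => intro t h; exact h
    | cons x xs ih => intro t h; exact ih _ (pvInv_step t x h)
  exact key l _ (by simp [pvInv])

theorem pvComb_unit (t : Int × Int × Int × Int) (h : pvInv t) : pvComb t (0, 0, 0, 0) = t := by
  obtain ⟨a, b, c, d⟩ := t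
  simp only [pvInv] at h
  simp only [pvComb, Prod.mk.injEq, max_def]
  refine ⟨by ring, by split_ifs <;> omega, by split_ifs <;> omega, by split_ifs <;> omega⟩

theorem pvComb_step (t u : Int × Int × Int × Int) (x : Int) :
    pvComb t (pvTStep u x) = pvTStep (pvComb t u) x := by
  obtain ⟨a, b, c, d⟩ := t
  obtain ⟨e, f, g, h⟩ := u
  simp only [pvComb, pvTStep, Prod.mk.injEq, max_def]
  refine ⟨by ring, by split_ifs <;> omega, by split_ifs <;> omega, by split_ifs <;> omega⟩

theorem pvT_append (l₁ l₂ : List Int) : pvT (l₁ ++ l₂) = pvComb (pvT l₁) (pvT l₂) := by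
  induction l₂ using List.reverseRecOn with
  | nil =>
    rw [List.append_nil]
    show pvT l₁ = pvComb (pvT l₁) (0, 0, 0, 0)
    rw [pvComb_unit _ (pvInv_T l₁)]
  | append_singleton l₂ x ih =>
    have hstep : ∀ (l : List Int), pvT (l ++ [x]) = pvTStep (pvT l) x := by
      intro l; unfold pvT; rw [List.foldl_append]; rfl
    rw [← List.append_assoc, hstep, hstep, ih, pvComb_step]

-- pvDcF with enough fuel computes pvT.
theorem pvDcF_eq : ∀ (fuel : Nat) (d : List Int), d.length ≤ fuel + 1 → pvDcF fuel d = pvT d := by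
  intro fuel
  induction fuel with
  | zero =>
    intro d hd
    match d, hd with
    | [], _ => simp [pvDcF, pvT]
    | [x], _ => simp [pvDcF, pvT, pvTStep]
  | succ f ih =>
    intro d hd
    match d with
    | [] => simp [pvDcF, pvT]
    | [x] => simp [pvDcF, pvT, pvTStep]
    | x :: y :: rest =>
      have hlen : (x :: y :: rest).length = rest.length + 2 := by simp
      have h1 : ((x :: y :: rest).take ((x :: y :: rest).length / 2)).length ≤ f + 1 := by
        simp only [List.length_take]; simp at hd ⊢; omega
      have h2 : ((x :: y :: rest).drop ((x :: y :: rest).length / 2)).length ≤ f + 1 := by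
        simp only [List.length_drop]; simp at hd ⊢; omega
      show pvComb (pvDcF f ((x :: y :: rest).take ((x :: y :: rest).length / 2)))
             (pvDcF f ((x :: y :: rest).drop ((x :: y :: rest).length / 2))) = pvT (x :: y :: rest)
      rw [ih _ h1, ih _ h2, ← pvT_append, List.take_append_drop]

theorem pvDc_eq (d : List Int) : pvDc d = pvT d :=
  pvDcF_eq d.length d (by omega)

-- A's Kadane pair fold, rewritten as a fold over differences.
def pvKStep (s : Int × Int) (x : Int) : Int × Int :=
  (max s.1 (max 0 (s.2 + x)), max 0 (s.2 + x))

theorem pvK_eq_T (l : List Int) : ∀ (t : Int × Int × Int × Int), 0 ≤ t.2.1 →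
    l.foldl pvKStep (t.2.1, t.2.2.2) = ((l.foldl pvTStep t).2.1, (l.foldl pvTStep t).2.2.2) := by
  induction l with
  | nil => intro t _; rfl
  | cons x xs ih =>
    intro t ht
    simp only [List.foldl_cons]
    obtain ⟨a, b, c, d⟩ := t
    simp only at ht
    have h1 : pvKStep (b, d) x = ((pvTStep (a, b, c, d) x).2.1, (pvTStep (a, b, c, d) x).2.2.2) := by
      simp only [pvKStep, pvTStep, Prod.mk.injEq, max_def]
      constructor <;> first | trivial | (split_ifs <;> omega)
    rw [h1, ih (pvTStep (a, b, c, d) x) (by simp only [pvTStep, max_def]; split_ifs <;> omega)]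

-- The indexed loop of A's kadane, on equal-length lists, is a fold over the zipped lists.
theorem pv_foldl_range_zip {σ : Type} (f : σ → Int → Int → σ) :
    ∀ (A B : List Int), A.length = B.length → ∀ (s : σ),
      (List.range A.length).foldl (fun (s : σ) (k : Nat) => f s (A.getD k 0) (B.getD k 0)) s
      = (A.zip B).foldl (fun s p => f s p.1 p.2) s := by
  intro A
  induction A with
  | nil => intro B h s; simp
  | cons a A ih =>
    intro B h s
    cases B with
    | nil => simp at h
    | cons b B =>
      simp only [List.length_cons, List.range_succ_eq_map, List.foldl_cons, List.foldl_map,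
        List.zip_cons_cons, List.getD_cons_zero, List.getD_cons_succ]
      exact ih B (by simpa using h) (f s a b)

-- pvKadane, on equal-length lists, equals best-subarray of the difference list plus sum.
theorem pv_kadane_eq (A B : List Int) (h : A.length = B.length) :
    pvKadane A B = (pvT ((A.zip B).map (fun p => p.1 - p.2))).2.1 + B.sum := by
  unfold pvKadane
  rw [PySem.List.pyRange_zero_nat, List.foldl_map]
  simp only [PySem.List.pyGetD_natCast]
  rw [pv_foldl_range_zip
    (fun (s : Int × Int) a b => let cur := max 0 (s.2 + a - b); (max s.1 cur, cur)) A B h]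
  have hfun : (fun (s : Int × Int) (p : Int × Int) =>
        let cur := max 0 (s.2 + p.1 - p.2); ((max s.1 cur, cur) : Int × Int))
      = fun s p => pvKStep s (p.1 - p.2) := by
    funext s p
    simp only [pvKStep, Prod.mk.injEq, max_def]
    constructor <;> first | trivial | (split_ifs <;> omega)
  have key : ∀ (l : List (Int × Int)) (s : Int × Int),
      l.foldl (fun s p => pvKStep s (p.1 - p.2)) s = (l.map (fun p => p.1 - p.2)).foldl pvKStep s := by
    intro l
    induction l with
    | nil => intro s; rfl
    | cons q t ih => intro s; simp only [List.foldl_cons, List.map_cons]; exact ih _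
  rw [hfun, key]
  have hk := pvK_eq_T ((A.zip B).map (fun p => p.1 - p.2)) (0, 0, 0, 0) (by norm_num)
  norm_num at hk
  simp only [pvT, hk]

-- Swapping the zip negates the differences.
theorem pv_zip_swap_neg : ∀ (A B : List Int),
    (B.zip A).map (fun p => p.1 - p.2) = ((A.zip B).map (fun p => p.1 - p.2)).map (fun x => -x) := by
  intro A
  induction A with
  | nil => intro B; cases B <;> simp
  | cons a A ih =>
    intro B
    cases B with
    | nil => simp
    | cons b B => simp [ih B]

-- ===== VERDICT (by name: the statement is the Claim_ definition above) =====
theorem maximumsSplicedArray_spec : Claim_equal_maximumsSplicedArray := by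
  intro A B _ h
  unfold Spec_maximumsSplicedArray
  simp only [maximumsSplicedArray, maximumsSplicedArray_alt]
  rw [pv_kadane_eq A B h, pv_kadane_eq B A h.symm, pv_zip_swap_neg A B,
    pvDc_eq, pvDc_eq]
  simp only [max_def]
  split_ifs <;> omega
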